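-- pv_equiv track=rewrite | github.com/pypi-data/pypi-mirror-380 | packages/spicelab/spicelab-0.3.1.tar.gz/spicelab-0.3.1/spicelab/io/spice_parser.py | preprocess_netlist
-- ===== SOURCE A (Python) =====
-- def preprocess_netlist(text: str) -> list[str]:
--     raw_lines = text.splitlines()
--     # join continuations starting with '+'
--     joined: list[str] = []
--     for ln in raw_lines:
--         if not ln.strip():
--             continue
--         if ln.lstrip().startswith("+") and joined:
--             cont = ln.lstrip()[1:].lstrip()
--             joined[-1] = joined[-1] + " " + cont
--         else:
--             joined.append(ln.rstrip("\n"))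
--
--     # capture .subckt blocks
--     lines: list[str] = []
--     i = 0
--     while i < len(joined):
--         ln = joined[i]
--         lstrip = ln.lstrip()
--         if lstrip.lower().startswith(".subckt"):
--             block = [ln]
--             i += 1
--             while i < len(joined):
--                 block.append(joined[i])
--                 if joined[i].lstrip().lower().startswith(".ends"):
--                     break
--                 i += 1
--             lines.append("\n".join(block))
--             i += 1
--             continue
--         lines.append(ln.strip())
--         i += 1
--     return lines
-- ===== SOURCE B (Python) =====
-- def preprocess_netlist(text: str) -> list[str]:
--     # Single fused pass: continuation joining and .subckt grouping in one scan,
--     # with the last kept line buffered so later '+' continuations can extend it.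
--     out: list[str] = []
--     mode = 0          # 0 = nothing buffered yet, 1 = plain line in buf, 2 = inside a .subckt block
--     buf = ""          # the most recent kept line (continuation target), unstripped
--     block: list[str] = []   # finished lines of the current block (before buf)
--     for ln in text.splitlines():
--         if not ln.strip():
--             continue
--         ls = ln.lstrip()
--         if ls.startswith("+") and mode != 0:
--             buf = buf + " " + ls[1:].lstrip()
--             continue
--         if mode == 2:
--             block.append(buf)
--             if buf.lstrip().lower().startswith(".ends"):
--                 out.append("\n".join(block))
--                 block = []
--                 mode = 0
--             else:
--                 buf = ln
--                 continue
--         if mode == 1: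
--             out.append(buf.strip())
--         if ls.lower().startswith(".subckt"):
--             mode = 2
--             block = []
--             buf = ln
--         else:
--             mode = 1
--             buf = ln
--     if mode == 2:
--         block.append(buf)
--         out.append("\n".join(block))
--     elif mode == 1:
--         out.append(buf.strip())
--     return out
-- ===== Notes on version B (the rewrite author's own statement) =====
-- stated objective: alternative
-- what changed: A's two sequential passes (first join '+' continuation lines over the whole list, then re-scan it with an index-based while loop to group .subckt blocks) are fused into one linear scan that buffers the most recently kept line as the continuation target and carries an explicit mode (plain line / inside block) plus a block accumulator, emitting output as it goes.
import Mathlib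
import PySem

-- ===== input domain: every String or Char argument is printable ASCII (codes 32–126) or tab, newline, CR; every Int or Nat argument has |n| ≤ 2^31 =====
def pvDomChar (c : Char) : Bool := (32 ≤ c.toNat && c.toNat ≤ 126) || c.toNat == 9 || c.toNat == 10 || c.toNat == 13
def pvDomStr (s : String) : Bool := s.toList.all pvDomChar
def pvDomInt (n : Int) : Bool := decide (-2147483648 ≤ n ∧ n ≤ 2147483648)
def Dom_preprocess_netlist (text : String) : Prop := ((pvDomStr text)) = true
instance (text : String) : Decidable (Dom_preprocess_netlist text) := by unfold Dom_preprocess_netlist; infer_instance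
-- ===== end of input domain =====

-- B replaces A's two sequential passes (join '+' continuations, then group .subckt blocks)
-- by a single fused scan that buffers the most recent kept line; objective: alternative (same cost).

-- shared small predicates (the same Python expressions occur verbatim in both programs)
-- ln.strip() is falsy
def pvIsBlank (ln : String) : Bool := PySem.Str.strip ln == ""
-- ln.lstrip().startswith("+")
def pvIsCont (ln : String) : Bool := PySem.Str.startswith (PySem.Str.lstrip ln) "+"
-- ln.lstrip()[1:].lstrip()
def pvContText (ln : String) : String := PySem.Str.lstrip (PySem.Str.slice (PySem.Str.lstrip ln) (some 1) none)
-- ln.lstrip().lower().startswith(".subckt")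
def pvIsSub (ln : String) : Bool := PySem.Str.startswith (PySem.Str.lower (PySem.Str.lstrip ln)) ".subckt"
-- ln.lstrip().lower().startswith(".ends")
def pvIsEnds (ln : String) : Bool := PySem.Str.startswith (PySem.Str.lower (PySem.Str.lstrip ln)) ".ends"

-- ===== PORT A =====
-- ln.rstrip("\n"): drop trailing '\n' characters (hand port, exact: Python strips exactly the given chars from the right)
def pvRstripNl (s : String) : String := String.ofList (s.toList.reverse.dropWhile (fun c => c == '\n')).reverse

-- first pass: join continuations ('joined[-1] = joined[-1] + " " + cont' ported as dropLast ++ [pyGetD joined (-1) "" ++ …])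
def pvJoin1 : List String → List String → List String
  | [], joined => joined
  | ln :: rest, joined =>
    if pvIsBlank ln then pvJoin1 rest joined
    else if pvIsCont ln && !joined.isEmpty then
      pvJoin1 rest (joined.dropLast ++ [PySem.List.pyGetD joined (-1) "" ++ " " ++ pvContText ln])
    else pvJoin1 rest (joined ++ [pvRstripNl ln])

-- inner while loop of the second pass: collect block lines up to and including the '.ends' line
def pvTakeBlock : List String → List String × List String
  | [] => ([], [])
  | x :: rest =>
    if pvIsEnds x then ([x], rest)
    else
      let r := pvTakeBlock rest
      (x :: r.1, r.2)

theorem pvTakeBlock_len : ∀ l : List String, (pvTakeBlock l).2.length ≤ l.length := by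
  intro l
  induction l with
  | nil => simp [pvTakeBlock]
  | cons x rest ih =>
    simp only [pvTakeBlock]
    split
    · simp
    · simpa using Nat.le_succ_of_le ih

-- second pass: index loop over joined, grouping .subckt blocks
def pvPass2 : List String → List String
  | [] => []
  | ln :: rest =>
    if pvIsSub ln then
      let r := pvTakeBlock rest
      PySem.Str.join "\n" (ln :: r.1) :: pvPass2 r.2
    else PySem.Str.strip ln :: pvPass2 rest
termination_by l => l.length
decreasing_by
  · simpa using Nat.lt_succ_of_le (pvTakeBlock_len _)
  · simp

def preprocess_netlist (text : String) : List String :=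
  pvPass2 (pvJoin1 (PySem.Str.splitlines text) [])

-- ===== PORT B =====
-- fused scan; state: mode (0 = nothing buffered, 1 = plain line in buf, 2 = inside block),
-- buf = most recent kept line (continuation target), block = finished lines of the current block
def pvScanB : List String → Nat → String → List String → List String → List String
  | [], mode, buf, block, out =>
    if mode == 2 then out ++ [PySem.Str.join "\n" (block ++ [buf])]
    else if mode == 1 then out ++ [PySem.Str.strip buf]
    else out
  | ln :: rest, mode, buf, block, out =>
    if pvIsBlank ln then pvScanB rest mode buf block out
    else if pvIsCont ln && !(mode == 0) then
      pvScanB rest mode (buf ++ " " ++ pvContText ln) block out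
    else if mode == 2 then
      let block' := block ++ [buf]
      if pvIsEnds buf then
        let out' := out ++ [PySem.Str.join "\n" block']
        if pvIsSub ln then pvScanB rest 2 ln [] out'
        else pvScanB rest 1 ln [] out'
      else pvScanB rest 2 ln block' out
    else
      let out' := if mode == 1 then out ++ [PySem.Str.strip buf] else out
      if pvIsSub ln then pvScanB rest 2 ln [] out'
      else pvScanB rest 1 ln [] out'

def preprocess_netlist_alt (text : String) : List String :=
  pvScanB (PySem.Str.splitlines text) 0 "" [] []

-- ===== PRECONDITION & SPEC =====
def Spec_preprocess_netlist (text : String) (out : List String) : Prop := out = preprocess_netlist_alt text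
instance (text : String) (out : List String) : Decidable (Spec_preprocess_netlist text out) := by unfold Spec_preprocess_netlist; infer_instance

-- ===== CLAIM (what is proved, stated in full; the proofs are below) =====
def Claim_equal_preprocess_netlist : Prop := ∀ (text : String), Dom_preprocess_netlist text → Spec_preprocess_netlist text (preprocess_netlist text)

-- ===== LEMMAS AND PROOFS =====

-- proof-side reformulation of A's first pass: the not-yet-flushed last joined line as an Option
def pvJ : List String → Option String → List String
  | [], none => []
  | [], some s => [s]
  | ln :: rest, last =>
    if pvIsBlank ln then pvJ rest last
    else if pvIsCont ln && last.isSome then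
      pvJ rest (some ((last.getD "") ++ " " ++ pvContText ln))
    else last.toList ++ pvJ rest (some ln)

-- ---- string facts ----

theorem pv_dropWhile_all (p : Char → Bool) (l : List Char) :
    (∀ c ∈ List.dropWhile p l, p c = true) ↔ ∀ c ∈ l, p c = true := by
  constructor
  · intro h c hc
    rw [← List.takeWhile_append_dropWhile (p := p) (l := l)] at hc
    rcases List.mem_append.mp hc with h' | h'
    · exact List.mem_takeWhile_imp h'
    · exact h c h'
  · intro h c hc
    exact h c ((List.dropWhile_sublist (p := p) (l := l)).subset hc)

theorem pv_blank_iff (s : String) :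
    pvIsBlank s = true ↔ ∀ c ∈ s.toList, PySem.Chars.isspace c = true := by
  simp only [pvIsBlank, PySem.Str.strip, beq_iff_eq, ← String.toList_inj, String.toList_ofList]
  show PySem.Chars.strip s.toList = "".toList ↔ _
  have : ("" : String).toList = [] := rfl
  rw [this]
  simp only [PySem.Chars.strip, PySem.Chars.rstrip, PySem.Chars.lstrip]
  rw [List.reverse_eq_nil_iff, List.dropWhile_eq_nil_iff]
  constructor
  · intro h
    rw [← pv_dropWhile_all PySem.Chars.isspace s.toList]
    intro c hc
    exact h c (by simpa using hc)
  · intro h c hc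
    rw [List.mem_reverse] at hc
    exact ((pv_dropWhile_all PySem.Chars.isspace s.toList).mpr h) c hc

theorem pv_lstrip_ne_nil (s : String) (h : pvIsBlank s = false) :
    PySem.Chars.lstrip s.toList ≠ [] := by
  intro hnil
  have : ∀ c ∈ s.toList, PySem.Chars.isspace c = true :=
    List.dropWhile_eq_nil_iff.mp hnil
  rw [← pv_blank_iff] at this
  simp [this] at h

theorem pv_lstrip_append (s : String) (b : List Char) (h : pvIsBlank s = false) :
    PySem.Chars.lstrip (s.toList ++ b) = PySem.Chars.lstrip s.toList ++ b := by
  have := pv_lstrip_ne_nil s h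
  simp only [PySem.Chars.lstrip] at *
  rw [List.dropWhile_append]
  simp [List.isEmpty_iff, this]

theorem pv_blank_append (s t : String) (h : pvIsBlank s = false) :
    pvIsBlank (s ++ t) = false := by
  rw [Bool.eq_false_iff] at h ⊢
  intro hb; apply h
  rw [pv_blank_iff] at hb ⊢
  intro c hc
  exact hb c (by simp [String.toList_append, hc])

theorem pv_blank_append_sp (s c : String) (h : pvIsBlank s = false) :
    pvIsBlank (s ++ " " ++ c) = false := by
  rw [String.append_assoc]
  exact pv_blank_append s (" " ++ c) h

-- appending " " ++ c to a nonblank line does not change its ".subckt" / ".ends" classification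
theorem pv_prefix_space_iff (p a b : List Char) (hp : ' ' ∉ p) :
    (p <+: (a ++ ' ' :: b)) ↔ p <+: a := by
  constructor
  · intro h
    by_cases hlen : p.length ≤ a.length
    · exact List.prefix_of_prefix_length_le h (List.prefix_append a (' ' :: b)) hlen
    · exfalso
      have hplen : a.length < p.length := by omega
      have hval : p[a.length]'hplen = ' ' := by
        rw [h.getElem (i := a.length) hplen]
        simp
      exact hp (hval ▸ List.getElem_mem hplen)
  · intro h
    exact List.prefix_append_of_prefix h

theorem pv_lower_append (a b : List Char) :
    PySem.Chars.lower (a ++ b) = PySem.Chars.lower a ++ PySem.Chars.lower b := by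
  simp [PySem.Chars.lower]

theorem pv_sub_stable (s c : String) (h : pvIsBlank s = false) :
    pvIsSub (s ++ " " ++ c) = pvIsSub s := by
  have htl : (s ++ " " ++ c).toList = s.toList ++ ' ' :: c.toList := by
    simp [String.toList_append]
  have hlc : PySem.Chars.lowerChar ' ' = ' ' := by decide
  simp only [pvIsSub, PySem.Str.startswith, PySem.Str.lower, PySem.Str.lstrip,
    String.toList_ofList, htl]
  rw [Bool.eq_iff_iff]
  rw [PySem.Chars.startswith_iff, PySem.Chars.startswith_iff]
  rw [pv_lstrip_append s (' ' :: c.toList) h, pv_lower_append]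
  have hcons : PySem.Chars.lower (' ' :: c.toList) = ' ' :: PySem.Chars.lower c.toList := by
    simp [PySem.Chars.lower, hlc]
  rw [hcons]
  exact pv_prefix_space_iff _ _ _ (by decide)

theorem pv_sub_not_ends (s : String) (h : pvIsSub s = true) : pvIsEnds s = false := by
  rw [Bool.eq_false_iff]
  intro he
  have h1 := (PySem.Chars.startswith_iff _ _).mp h
  have h2 := (PySem.Chars.startswith_iff _ _).mp he
  simp only [PySem.Str.lower, PySem.Str.lstrip, String.toList_ofList] at h1 h2
  have := List.prefix_of_prefix_length_le h2 h1 (by decide)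
  revert this; decide

-- ---- step equations for the ports' loops ----

theorem pvPass2_nil : pvPass2 [] = [] := by rw [pvPass2]

theorem pvPass2_cons (a : String) (u : List String) :
    pvPass2 (a :: u) =
      if pvIsSub a then
        PySem.Str.join "\n" (a :: (pvTakeBlock u).1) :: pvPass2 (pvTakeBlock u).2
      else PySem.Str.strip a :: pvPass2 u := by
  rw [pvPass2]

theorem pvJ_blank (ln : String) (rest : List String) (last : Option String)
    (h : pvIsBlank ln = true) : pvJ (ln :: rest) last = pvJ rest last := by
  simp [pvJ, h]

theorem pvJ_cont (ln : String) (rest : List String) (s : String)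
    (hb : pvIsBlank ln = false) (hc : pvIsCont ln = true) :
    pvJ (ln :: rest) (some s) = pvJ rest (some (s ++ " " ++ pvContText ln)) := by
  simp [pvJ, hb, hc]

theorem pvJ_norm (ln : String) (rest : List String) (s : String)
    (hb : pvIsBlank ln = false) (hc : pvIsCont ln = false) :
    pvJ (ln :: rest) (some s) = s :: pvJ rest (some ln) := by
  simp [pvJ, hb, hc]

theorem pvJ_none (ln : String) (rest : List String)
    (hb : pvIsBlank ln = false) : pvJ (ln :: rest) none = pvJ rest (some ln) := by
  simp [pvJ, hb]

theorem pvJoin1_blank (ln : String) (rest : List String) (joined : List String)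
    (h : pvIsBlank ln = true) : pvJoin1 (ln :: rest) joined = pvJoin1 rest joined := by
  simp [pvJoin1, h]

theorem pvJoin1_cont (ln : String) (rest : List String) (joined : List String)
    (hb : pvIsBlank ln = false) (hc : pvIsCont ln = true) (hj : joined.isEmpty = false) :
    pvJoin1 (ln :: rest) joined =
      pvJoin1 rest (joined.dropLast ++ [PySem.List.pyGetD joined (-1) "" ++ " " ++ pvContText ln]) := by
  simp [pvJoin1, hb, hc, hj]

theorem pvJoin1_norm (ln : String) (rest : List String) (joined : List String)
    (hb : pvIsBlank ln = false) (hc : (pvIsCont ln && !joined.isEmpty) = false) :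
    pvJoin1 (ln :: rest) joined = pvJoin1 rest (joined ++ [pvRstripNl ln]) := by
  simp only [pvJoin1, hb, Bool.false_eq_true, if_false, hc]

theorem pvScanB_nil (m : Nat) (buf : String) (blk out : List String) :
    pvScanB [] m buf blk out =
      if m == 2 then out ++ [PySem.Str.join "\n" (blk ++ [buf])]
      else if m == 1 then out ++ [PySem.Str.strip buf]
      else out := by
  simp [pvScanB]

theorem pvScanB_blank (ln : String) (rest : List String) (m : Nat) (buf : String)
    (blk out : List String) (h : pvIsBlank ln = true) :
    pvScanB (ln :: rest) m buf blk out = pvScanB rest m buf blk out := by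
  simp [pvScanB, h]

theorem pvScanB_cont (ln : String) (rest : List String) (m : Nat) (buf : String)
    (blk out : List String) (hb : pvIsBlank ln = false) (hc : pvIsCont ln = true)
    (hm : (m == 0) = false) :
    pvScanB (ln :: rest) m buf blk out =
      pvScanB rest m (buf ++ " " ++ pvContText ln) blk out := by
  simp [pvScanB, hb, hc, hm]

theorem pvScanB_norm0 (ln : String) (rest : List String) (buf : String)
    (blk out : List String) (hb : pvIsBlank ln = false) :
    pvScanB (ln :: rest) 0 buf blk out =
      if pvIsSub ln then pvScanB rest 2 ln [] out else pvScanB rest 1 ln [] out := by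
  simp [pvScanB, hb]

theorem pvScanB_norm1 (ln : String) (rest : List String) (s : String)
    (blk out : List String) (hb : pvIsBlank ln = false) (hc : pvIsCont ln = false) :
    pvScanB (ln :: rest) 1 s blk out =
      if pvIsSub ln then pvScanB rest 2 ln [] (out ++ [PySem.Str.strip s])
      else pvScanB rest 1 ln [] (out ++ [PySem.Str.strip s]) := by
  simp [pvScanB, hb, hc]

theorem pvScanB_norm2 (ln : String) (rest : List String) (s : String)
    (blk out : List String) (hb : pvIsBlank ln = false) (hc : pvIsCont ln = false) :
    pvScanB (ln :: rest) 2 s blk out =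
      if pvIsEnds s then
        (if pvIsSub ln then
          pvScanB rest 2 ln [] (out ++ [PySem.Str.join "\n" (blk ++ [s])])
        else pvScanB rest 1 ln [] (out ++ [PySem.Str.join "\n" (blk ++ [s])]))
      else pvScanB rest 2 ln (blk ++ [s]) out := by
  simp [pvScanB, hb, hc]

theorem pvTakeBlock_ends (s : String) (u : List String) (he : pvIsEnds s = true) :
    pvTakeBlock (s :: u) = ([s], u) := by
  simp [pvTakeBlock, he]

theorem pvTakeBlock_mid (s : String) (u : List String) (he : pvIsEnds s = false) :
    pvTakeBlock (s :: u) = (s :: (pvTakeBlock u).1, (pvTakeBlock u).2) := by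
  simp [pvTakeBlock, he]

-- ---- relating A's first pass to pvJ ----

theorem pv_join1_concat : ∀ (lines : List String) (p : List String) (s : String),
    (∀ l ∈ lines, pvRstripNl l = l) →
    pvJoin1 lines (p ++ [s]) = p ++ pvJ lines (some s) := by
  intro lines
  induction lines with
  | nil => intro p s _; simp [pvJoin1, pvJ]
  | cons ln rest ih =>
    intro p s hr
    have hrest : ∀ l ∈ rest, pvRstripNl l = l := fun l hl => hr l (List.mem_cons_of_mem _ hl)
    by_cases hb : pvIsBlank ln = true
    · rw [pvJoin1_blank _ _ _ hb, pvJ_blank _ _ _ hb]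
      exact ih p s hrest
    · rw [Bool.not_eq_true] at hb
      by_cases hc : pvIsCont ln = true
      · rw [pvJoin1_cont _ _ _ hb hc (by simp), pvJ_cont _ _ _ hb hc]
        have h1 : (p ++ [s]).dropLast = p := by simp
        have h2 : PySem.List.pyGetD (p ++ [s]) (-1) "" = s := by
          simp [PySem.List.pyGetD, PySem.List.pyGet?, PySem.List.pyIdx?]
        rw [h1, h2]
        exact ih p _ hrest
      · rw [Bool.not_eq_true] at hc
        rw [pvJoin1_norm _ _ _ hb (by simp [hc]), pvJ_norm _ _ _ hb hc]
        rw [hr ln (List.mem_cons_self)]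
        have hassoc : p ++ [s] ++ [ln] = (p ++ [s]) ++ [ln] := rfl
        rw [hassoc, ih (p ++ [s]) ln hrest]
        simp

theorem pv_join1_nil : ∀ (lines : List String),
    (∀ l ∈ lines, pvRstripNl l = l) →
    pvJoin1 lines [] = pvJ lines none := by
  intro lines
  induction lines with
  | nil => intro _; simp [pvJoin1, pvJ]
  | cons ln rest ih =>
    intro hr
    have hrest : ∀ l ∈ rest, pvRstripNl l = l := fun l hl => hr l (List.mem_cons_of_mem _ hl)
    by_cases hb : pvIsBlank ln = true
    · rw [pvJoin1_blank _ _ _ hb, pvJ_blank _ _ _ hb]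
      exact ih hrest
    · rw [Bool.not_eq_true] at hb
      rw [pvJoin1_norm _ _ _ hb (by simp), pvJ_none _ _ hb]
      rw [hr ln (List.mem_cons_self)]
      simpa using pv_join1_concat rest [] ln hrest

-- splitlines never leaves a line-break character inside a produced line
theorem pv_splitlines_go_no_nl (isB : Char → Bool) :
    ∀ (s cur : List Char) (acc : List (List Char)),
    (∀ l ∈ acc, ∀ c ∈ l, isB c = false) →
    (∀ c ∈ cur, isB c = false) →
    ∀ l ∈ PySem.Chars.splitlines.go isB s cur acc, ∀ c ∈ l, isB c = false := by
  intro s cur acc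
  induction s, cur, acc using PySem.Chars.splitlines.go.induct isB with
  | case1 cur acc hemp =>
    intro hacc hcur l hl
    rw [PySem.Chars.splitlines.go] at hl
    rw [if_pos hemp] at hl
    exact hacc l (by simpa using hl)
  | case2 cur acc hemp =>
    intro hacc hcur l hl
    rw [PySem.Chars.splitlines.go] at hl
    rw [if_neg hemp] at hl
    simp only [List.mem_reverse, List.mem_cons] at hl
    rcases hl with h | h
    · subst h; intro c hc; exact hcur c (by simpa using hc)
    · exact hacc l h
  | case3 rest cur acc ih =>
    intro hacc hcur l hl
    rw [PySem.Chars.splitlines.go] at hl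
    exact ih
      (by intro l' hl'
          rcases List.mem_cons.mp hl' with h | h
          · subst h; intro c hc; exact hcur c (by simpa using hc)
          · exact hacc l' h)
      (by simp) l hl
  | case4 c rest cur acc hne hcb ih =>
    intro hacc hcur l hl
    rw [PySem.Chars.splitlines.go] at hl
    split at hl
    all_goals first
      | exact hne
      | exact absurd hcb ‹¬isB c = true›
      | exact ih
          (by intro l' hl'
              rcases List.mem_cons.mp hl' with h | h
              · subst h; intro c' hc'; exact hcur c' (by simpa using hc')
              · exact hacc l' h)
          (by simp) l hl
  | case5 c rest cur acc hne hcb ih =>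
    intro hacc hcur l hl
    rw [PySem.Chars.splitlines.go] at hl
    split at hl
    all_goals first
      | exact hne
      | exact absurd ‹isB c = true› hcb
      | exact ih hacc
          (by intro c' hc'
              rcases List.mem_cons.mp hc' with h | h
              · subst h; simpa using hcb
              · exact hcur c' h) l hl

theorem pv_splitlines_rstrip (text : String) :
    ∀ l ∈ PySem.Str.splitlines text, pvRstripNl l = l := by
  intro l hl
  have hmem : l.toList ∈ PySem.Chars.splitlines text.toList := by
    rw [← PySem.Str.splitlines_map_toList]
    exact List.mem_map_of_mem hl
  have hnonl : '\n' ∉ l.toList := by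
    intro h
    have hno := pv_splitlines_go_no_nl _ text.toList [] []
      (by simp) (by simp) l.toList
      (by simpa [PySem.Chars.splitlines] using hmem) '\n' h
    simp at hno
  have hd : List.dropWhile (fun c => c == '\n') l.toList.reverse = l.toList.reverse := by
    cases hrev : l.toList.reverse with
    | nil => simp
    | cons a t =>
      rw [List.dropWhile_cons]
      have ha : a ∈ l.toList := by
        rw [← List.mem_reverse, hrev]; simp
      have hane : (a == '\n') = false := by
        cases hbe : a == '\n'
        · rfl
        · exact absurd ((beq_iff_eq.mp hbe) ▸ ha) hnonl
      rw [hane]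
      simp
  unfold pvRstripNl
  rw [hd, List.reverse_reverse, String.ofList_toList]

-- ---- the main simulation lemma ----

-- pvPass2 applied to a pvJ-list whose head line is a .subckt line equals the
-- empty-prefix block form (B enters mode 2 exactly when A's second pass opens a block)
theorem pv_blockify_nil : ∀ (lines : List String) (s : String),
    pvIsBlank s = false → pvIsSub s = true →
    PySem.Str.join "\n" (pvTakeBlock (pvJ lines (some s))).1 ::
        pvPass2 (pvTakeBlock (pvJ lines (some s))).2
      = pvPass2 (pvJ lines (some s)) := by
  intro lines
  induction lines with
  | nil =>
    intro s _ hsub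
    have hne := pv_sub_not_ends s hsub
    simp [pvJ, pvTakeBlock, pvPass2_nil, pvPass2_cons, hsub, hne]
  | cons ln rest ih =>
    intro s hnb hsub
    by_cases hb : pvIsBlank ln = true
    · rw [pvJ_blank _ _ _ hb]
      exact ih s hnb hsub
    · rw [Bool.not_eq_true] at hb
      by_cases hc : pvIsCont ln = true
      · rw [pvJ_cont _ _ _ hb hc]
        exact ih _ (pv_blank_append_sp s (pvContText ln) hnb)
          (by rw [pv_sub_stable s (pvContText ln) hnb]; exact hsub)
      · rw [Bool.not_eq_true] at hc
        rw [pvJ_norm _ _ _ hb hc]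
        have hne := pv_sub_not_ends s hsub
        rw [pvTakeBlock_mid _ _ hne, pvPass2_cons, if_pos hsub]

theorem pv_main : ∀ (lines : List String),
    (∀ buf block out, pvScanB lines 0 buf block out = out ++ pvPass2 (pvJ lines none)) ∧
    (∀ s block out, pvIsBlank s = false → pvIsSub s = false →
      pvScanB lines 1 s block out = out ++ pvPass2 (pvJ lines (some s))) ∧
    (∀ s blk out, pvIsBlank s = false →
      pvScanB lines 2 s blk out =
        out ++ (PySem.Str.join "\n" (blk ++ (pvTakeBlock (pvJ lines (some s))).1) ::
                pvPass2 (pvTakeBlock (pvJ lines (some s))).2)) := by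
  intro lines
  induction lines with
  | nil =>
    refine ⟨?_, ?_, ?_⟩
    · intro buf block out; simp [pvScanB_nil, pvJ, pvPass2_nil]
    · intro s block out hnb hns
      simp [pvScanB_nil, pvJ, pvPass2_nil, pvPass2_cons, hns]
    · intro s blk out hnb
      by_cases he : pvIsEnds s = true
      · simp [pvScanB_nil, pvJ, pvTakeBlock, pvPass2_nil, he]
      · simp [pvScanB_nil, pvJ, pvTakeBlock, pvPass2_nil, he]
  | cons ln rest ih =>
    obtain ⟨ih0, ih1, ih2⟩ := ih
    refine ⟨?_, ?_, ?_⟩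
    · -- mode 0: nothing buffered
      intro buf block out
      by_cases hb : pvIsBlank ln = true
      · rw [pvScanB_blank _ _ _ _ _ _ hb, pvJ_blank _ _ _ hb]
        exact ih0 buf block out
      · rw [Bool.not_eq_true] at hb
        rw [pvScanB_norm0 _ _ _ _ _ hb, pvJ_none _ _ hb]
        by_cases hs : pvIsSub ln = true
        · rw [if_pos hs, ih2 ln [] out hb]
          simp only [List.nil_append]
          rw [pv_blockify_nil rest ln hb hs]
        · rw [if_neg (by simp [hs]), ih1 ln [] out hb (by simpa using hs)]
    · -- mode 1: a plain line is buffered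
      intro s block out hnb hns
      by_cases hb : pvIsBlank ln = true
      · rw [pvScanB_blank _ _ _ _ _ _ hb, pvJ_blank _ _ _ hb]
        exact ih1 s block out hnb hns
      · rw [Bool.not_eq_true] at hb
        by_cases hc : pvIsCont ln = true
        · rw [pvScanB_cont _ _ _ _ _ _ hb hc (by decide), pvJ_cont _ _ _ hb hc]
          exact ih1 _ block out (pv_blank_append_sp s (pvContText ln) hnb)
            (by rw [pv_sub_stable s (pvContText ln) hnb]; exact hns)
        · rw [Bool.not_eq_true] at hc
          rw [pvScanB_norm1 _ _ _ _ _ hb hc, pvJ_norm _ _ _ hb hc]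
          rw [pvPass2_cons (a := s), if_neg (show ¬(pvIsSub s = true) by simp [hns])]
          by_cases hs : pvIsSub ln = true
          · rw [if_pos hs, ih2 ln [] (out ++ [PySem.Str.strip s]) hb]
            simp only [List.nil_append, List.append_assoc, List.singleton_append]
            rw [pv_blockify_nil rest ln hb hs]
          · rw [if_neg (by simp [hs]),
              ih1 ln [] (out ++ [PySem.Str.strip s]) hb (by simpa using hs)]
            simp
    · -- mode 2: inside a .subckt block
      intro s blk out hnb
      by_cases hb : pvIsBlank ln = true
      · rw [pvScanB_blank _ _ _ _ _ _ hb, pvJ_blank _ _ _ hb]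
        exact ih2 s blk out hnb
      · rw [Bool.not_eq_true] at hb
        by_cases hc : pvIsCont ln = true
        · rw [pvScanB_cont _ _ _ _ _ _ hb hc (by decide), pvJ_cont _ _ _ hb hc]
          exact ih2 _ blk out (pv_blank_append_sp s (pvContText ln) hnb)
        · rw [Bool.not_eq_true] at hc
          rw [pvScanB_norm2 _ _ _ _ _ hb hc, pvJ_norm _ _ _ hb hc]
          by_cases he : pvIsEnds s = true
          · rw [if_pos he, pvTakeBlock_ends _ _ he]
            by_cases hs : pvIsSub ln = true
            · rw [if_pos hs, ih2 ln [] (out ++ [PySem.Str.join "\n" (blk ++ [s])]) hb]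
              simp only [List.nil_append, List.append_assoc, List.singleton_append]
              rw [pv_blockify_nil rest ln hb hs]
            · rw [if_neg (by simp [hs]),
                ih1 ln [] (out ++ [PySem.Str.join "\n" (blk ++ [s])]) hb (by simpa using hs)]
              simp
          · rw [Bool.not_eq_true] at he
            rw [if_neg (by simp [he]), pvTakeBlock_mid _ _ he]
            rw [ih2 ln (blk ++ [s]) out hb]
            simp

-- ===== VERDICT (by name: the statement is the Claim_ definition above) =====
theorem preprocess_netlist_spec : Claim_equal_preprocess_netlist := by
  intro text _
  unfold Spec_preprocess_netlist preprocess_netlist preprocess_netlist_alt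
  rw [pv_join1_nil (PySem.Str.splitlines text) (pv_splitlines_rstrip text)]
  rw [(pv_main (PySem.Str.splitlines text)).1 "" [] []]
  simp
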